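-- pv_equiv track=rewrite | github.com/CellMechLab/softmech | softmech/ui/designer/widgets/block_pipeline_editor.py | _format_equation_text
-- ===== SOURCE A (Python) =====
-- def _format_equation_text(equation: str) -> str:
--     """Render a readable Unicode equation from common LaTeX-style tokens."""
--     text = (equation or "").strip()
--     if not text:
--         return ""
--
--     replacements = {
--         "\\delta": "δ",
--         "\\nu": "ν",
--         "\\sqrt": "√",
--         "\\frac": "",
--         "\\left": "",
--         "\\right": "",
--         "\\,": " ",
--         "^2": "²",
--         "^3": "³",
--     }
--     for source, target in replacements.items():
--         text = text.replace(source, target)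
--
--     text = text.replace("{", "").replace("}", "")
--     text = text.replace("=", " = ")
--     return " ".join(text.split())
-- ===== SOURCE B (Python) =====
-- def _format_equation_text(equation: str) -> str:
--     """Render a readable Unicode equation from common LaTeX-style tokens.
--
--     Same sequential token substitutions as the original, but each one is an
--     explicit index scan, and the final cleanup (brace removal, '=' spacing,
--     whitespace collapsing) is fused into a single stateful pass instead of
--     three .replace passes plus split/join.
--     """
--     text = (equation or "").strip()
--     if not text:
--         return ""
--
--     tokens = (
--         ("\\delta", "δ"),
--         ("\\nu", "ν"),
--         ("\\sqrt", "√"),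
--         ("\\frac", ""),
--         ("\\left", ""),
--         ("\\right", ""),
--         ("\\,", " "),
--         ("^2", "²"),
--         ("^3", "³"),
--     )
--     for src, tgt in tokens:
--         pieces = []
--         i = 0
--         n = len(text)
--         m = len(src)
--         while i < n:
--             if text.startswith(src, i):
--                 pieces.append(tgt)
--                 i += m
--             else:
--                 pieces.append(text[i])
--                 i += 1
--         text = "".join(pieces)
--
--     # one pass: drop braces, isolate '=' as its own word, collapse whitespace
--     out = []
--     sep = False
--     for ch in text:
--         if ch == "{" or ch == "}":
--             continue
--         if ch.isspace():
--             sep = True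
--         elif ch == "=":
--             if out:
--                 out.append(" ")
--             out.append("=")
--             sep = True
--         else:
--             if sep and out:
--                 out.append(" ")
--             out.append(ch)
--             sep = False
--     return "".join(out)
-- ===== Notes on version B (the rewrite author's own statement) =====
-- stated objective: alternative
-- what changed: B keeps A's sequential token substitutions (so cascaded replacements match exactly) but inlines each substitution as an explicit index scan instead of str.replace, and fuses A's entire final cleanup - two brace-removal replace passes, equals-sign spacing, whitespace split and single-space join - into one stateful left-to-right pass over the text.
import Mathlib
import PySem

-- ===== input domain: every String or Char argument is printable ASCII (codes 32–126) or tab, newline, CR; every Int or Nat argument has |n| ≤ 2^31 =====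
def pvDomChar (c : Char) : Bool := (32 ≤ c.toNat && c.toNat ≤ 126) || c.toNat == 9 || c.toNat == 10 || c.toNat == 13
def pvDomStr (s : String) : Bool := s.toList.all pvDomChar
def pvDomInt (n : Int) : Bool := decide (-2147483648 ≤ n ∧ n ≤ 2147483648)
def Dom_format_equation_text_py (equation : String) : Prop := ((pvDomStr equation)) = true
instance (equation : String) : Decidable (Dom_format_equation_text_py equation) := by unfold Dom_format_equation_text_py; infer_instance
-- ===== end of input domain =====

-- B keeps A's sequential token substitutions but inlines each of them as an explicit
-- index scan, and fuses A's final cleanup (two brace .replace passes, '=' spacing,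
-- split + join) into ONE stateful pass (alternative decomposition, same cost).

-- ===== PORT A =====
def format_equation_text_py (equation : String) : String :=
  let text := PySem.Str.strip equation
  if PySem.Str.len text = 0 then ""
  else
    let t1 := PySem.Str.replace text "\\delta" "δ"
    let t2 := PySem.Str.replace t1 "\\nu" "ν"
    let t3 := PySem.Str.replace t2 "\\sqrt" "√"
    let t4 := PySem.Str.replace t3 "\\frac" ""
    let t5 := PySem.Str.replace t4 "\\left" ""
    let t6 := PySem.Str.replace t5 "\\right" ""
    let t7 := PySem.Str.replace t6 "\\," " "
    let t8 := PySem.Str.replace t7 "^2" "²"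
    let t9 := PySem.Str.replace t8 "^3" "³"
    let t10 := PySem.Str.replace (PySem.Str.replace t9 "{" "") "}" ""
    let t11 := PySem.Str.replace t10 "=" " = "
    PySem.Str.join " " (PySem.Str.split₀ t11)

-- ===== PORT B =====
-- Source B's token table, in order
def pvToksB : List (List Char × List Char) :=
  [("\\delta".toList, "δ".toList), ("\\nu".toList, "ν".toList), ("\\sqrt".toList, "√".toList),
   ("\\frac".toList, []), ("\\left".toList, []), ("\\right".toList, []),
   ("\\,".toList, " ".toList), ("^2".toList, "²".toList), ("^3".toList, "³".toList)]

-- Source B's inner while loop for one token: emit tgt past a match, else copy the char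
def pvScanTok (src tgt : List Char) : List Char → List Char
  | [] => []
  | c :: t =>
    if src.isPrefixOf (c :: t) then tgt ++ pvScanTok src tgt (t.drop (src.length - 1))
    else c :: pvScanTok src tgt t
termination_by l => l.length
decreasing_by
  · simp only [List.length_cons, List.length_drop]; omega
  · simp

-- Source B's single final pass: skip braces, isolate '=' as a word, collapse whitespace
def pvStep (st : List Char × Bool) (c : Char) : List Char × Bool :=
  if c = '{' ∨ c = '}' then st
  else if PySem.Chars.isspace c then (st.1, true)
  else if c = '=' then ((if st.1.isEmpty then st.1 else st.1 ++ [' ']) ++ ['='], true)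
  else ((if st.2 && !st.1.isEmpty then st.1 ++ [' '] else st.1) ++ [c], false)

def format_equation_text_py_alt (equation : String) : String :=
  let text := PySem.Str.strip equation
  if PySem.Str.len text = 0 then ""
  else
    let t := pvToksB.foldl (fun s p => pvScanTok p.1 p.2 s) text.toList
    String.ofList ((t.foldl pvStep ([], false)).1)

-- ===== PRECONDITION & SPEC =====
def Spec_format_equation_text_py (equation : String) (out : String) : Prop := out = format_equation_text_py_alt equation
instance (equation : String) (out : String) : Decidable (Spec_format_equation_text_py equation out) := by unfold Spec_format_equation_text_py; infer_instance

-- ===== CLAIM (what is proved, stated in full; the proofs are below) =====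
def Claim_equal_format_equation_text_py : Prop := ∀ (equation : String), Dom_format_equation_text_py equation → Spec_format_equation_text_py equation (format_equation_text_py equation)

-- ===== LEMMAS AND PROOFS =====

theorem pvScanTok_cons_pos {src : List Char} (tgt : List Char) {c : Char} {t : List Char}
    (h : src <+: (c :: t)) :
    pvScanTok src tgt (c :: t) = tgt ++ pvScanTok src tgt (t.drop (src.length - 1)) := by
  rw [pvScanTok, if_pos (List.isPrefixOf_iff_prefix.mpr h)]

theorem pvScanTok_cons_neg {src : List Char} (tgt : List Char) {c : Char} {t : List Char}
    (h : ¬ src <+: (c :: t)) :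
    pvScanTok src tgt (c :: t) = c :: pvScanTok src tgt t := by
  rw [pvScanTok, if_neg (fun hh => h (List.isPrefixOf_iff_prefix.mp hh))]

-- str.replace with a nonempty pattern IS Source B's scan
theorem pvScanTok_go (old new : List Char) (h : old ≠ []) :
    ∀ fuel (l acc : List Char), l.length ≤ fuel →
      PySem.Chars.replace.go old new fuel l acc = acc.reverse ++ pvScanTok old new l := by
  intro fuel
  induction fuel with
  | zero =>
    intro l acc hl
    have : l = [] := by cases l <;> simp_all
    subst this
    rw [PySem.Chars.replace.go]; simp [pvScanTok]
  | succ n ih =>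
    intro l acc hl
    cases l with
    | nil =>
      rw [PySem.Chars.replace.go]; simp [pvScanTok]; omega
    | cons c t =>
      rw [PySem.Chars.replace.go]
      by_cases hp : old.isPrefixOf (c :: t)
      · rw [if_pos hp]
        have hpre : old <+: (c :: t) := List.isPrefixOf_iff_prefix.mp hp
        have hdrop : List.drop old.length (c :: t) = t.drop (old.length - 1) := by
          cases old with
          | nil => simp_all
          | cons o os => simp
        rw [hdrop, ih _ _ (by simp at hl ⊢; omega)]
        rw [pvScanTok_cons_pos new hpre]
        simp
      · rw [if_neg hp]
        rw [ih _ _ (by simp at hl ⊢; omega)]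
        rw [pvScanTok_cons_neg new (fun hh => hp (List.isPrefixOf_iff_prefix.mpr hh))]
        simp

theorem pvReplace_eq_scanTok (s old new : List Char) (h : old ≠ []) :
    PySem.Chars.replace s old new = pvScanTok old new s := by
  rw [PySem.Chars.replace, if_neg (by simpa using h)]
  simpa using pvScanTok_go old new h s.length s [] le_rfl

-- a single-character pattern scan is a flatMap
theorem pvScanTok_single (x : Char) (r : List Char) :
    ∀ l, pvScanTok [x] r l = l.flatMap (fun c => if c = x then r else [c]) := by
  intro l
  induction l with
  | nil => simp [pvScanTok]
  | cons c t ih =>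
    by_cases h : c = x
    · rw [pvScanTok_cons_pos r (List.cons_prefix_cons.mpr ⟨h.symm, List.nil_prefix⟩)]
      simp [h, ih]
    · rw [pvScanTok_cons_neg r (fun hp => h (List.cons_prefix_cons.mp hp).1.symm)]
      simp [h, ih]

-- the per-character effect of A's three tail replaces ('{', '}', then '=')
def pvGchar (c : Char) : List Char :=
  if c = '{' ∨ c = '}' then [] else if c = '=' then [' ', '=', ' '] else [c]

theorem pvTailReps (l : List Char) :
    pvScanTok ['='] [' ', '=', ' '] (pvScanTok ['}'] [] (pvScanTok ['{'] [] l)) =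
      l.flatMap pvGchar := by
  rw [pvScanTok_single, pvScanTok_single, pvScanTok_single,
      List.flatMap_assoc, List.flatMap_assoc]
  apply List.flatMap_congr
  intro c _
  by_cases h1 : c = '{'
  · simp [h1, pvGchar]
  · by_cases h2 : c = '}'
    · simp [h2, pvGchar]
    · by_cases h3 : c = '='
      · simp [h3, pvGchar]
      · simp [pvGchar, h1, h2, h3]

-- words of the fused pass, with a (reversed) current-word and word accumulator
def pvWGo : List Char → List Char → List (List Char) → List (List Char)
  | [], cur, acc => if cur.isEmpty then acc.reverse else (cur.reverse :: acc).reverse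
  | c :: rest, cur, acc =>
    if c = '{' ∨ c = '}' then pvWGo rest cur acc
    else if PySem.Chars.isspace c then
      if cur.isEmpty then pvWGo rest [] acc else pvWGo rest [] (cur.reverse :: acc)
    else if c = '=' then
      if cur.isEmpty then pvWGo rest [] (['='] :: acc)
      else pvWGo rest [] (['='] :: cur.reverse :: acc)
    else pvWGo rest (c :: cur) acc

-- Python split() of the expanded text computes exactly these words
theorem pvSplit_words :
    ∀ (l cur : List Char) (acc : List (List Char)),
      PySem.Chars.split₀.go (l.flatMap pvGchar) cur acc = pvWGo l cur acc := by
  intro l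
  induction l with
  | nil => intro cur acc; rfl
  | cons c rest ih =>
    intro cur acc
    by_cases h1 : c = '{' ∨ c = '}'
    · have hg : pvGchar c = [] := by rw [pvGchar, if_pos h1]
      simp only [List.flatMap_cons, hg, List.nil_append, pvWGo, if_pos h1]
      exact ih cur acc
    · by_cases h2 : PySem.Chars.isspace c = true
      · have hg : pvGchar c = [c] := by
          rw [pvGchar, if_neg h1, if_neg (by rintro rfl; simp [PySem.Chars.isspace] at h2)]
        simp only [List.flatMap_cons, hg, List.cons_append, List.nil_append]
        rw [PySem.Chars.split₀.go, if_pos h2]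
        rw [pvWGo, if_neg h1, if_pos h2]
        by_cases hc : cur.isEmpty
        · simpa [hc] using ih [] acc
        · simpa [hc] using ih [] (cur.reverse :: acc)
      · by_cases h3 : c = '='
        · subst h3
          have hg : pvGchar '=' = [' ', '=', ' '] := by decide
          simp only [List.flatMap_cons, hg, List.cons_append, List.nil_append]
          rw [PySem.Chars.split₀.go, if_pos (by decide : PySem.Chars.isspace ' ' = true)]
          rw [pvWGo, if_neg h1, if_neg h2, if_pos rfl]
          by_cases hc : cur.isEmpty
          · rw [if_pos hc, if_pos hc]
            rw [PySem.Chars.split₀.go, if_neg (by simpa using h2)]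
            rw [PySem.Chars.split₀.go, if_pos (by decide : PySem.Chars.isspace ' ' = true),
                if_neg (by decide)]
            simpa using ih [] (['='] :: acc)
          · rw [if_neg hc, if_neg hc]
            rw [PySem.Chars.split₀.go, if_neg (by simpa using h2)]
            rw [PySem.Chars.split₀.go, if_pos (by decide : PySem.Chars.isspace ' ' = true),
                if_neg (by decide)]
            simpa using ih [] (['='] :: cur.reverse :: acc)
        · have hg : pvGchar c = [c] := by rw [pvGchar, if_neg h1, if_neg h3]
          simp only [List.flatMap_cons, hg, List.cons_append, List.nil_append]
          rw [PySem.Chars.split₀.go, if_neg (by simpa using h2)]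
          rw [pvWGo, if_neg h1, if_neg (by simpa using h2), if_neg h3]
          exact ih (c :: cur) acc

-- output text a machine state stands for
def pvRender (acc : List (List Char)) (cur : List Char) : List Char :=
  List.intercalate [' '] (if cur.isEmpty then acc.reverse else acc.reverse ++ [cur.reverse])

theorem pvRender_nil (acc : List (List Char)) :
    pvRender acc [] = List.intercalate [' '] acc.reverse := by
  simp [pvRender]

theorem pvRender_ne (acc : List (List Char)) {cur : List Char} (h : cur ≠ []) :
    pvRender acc cur = List.intercalate [' '] (acc.reverse ++ [cur.reverse]) := by
  simp [pvRender, List.isEmpty_iff, h]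

theorem pvInter_snoc (xs : List (List Char)) (y : List Char) :
    List.intercalate [' '] (xs ++ [y]) =
      (if xs.isEmpty then [] else List.intercalate [' '] xs ++ [' ']) ++ y := by
  induction xs with
  | nil => simp [List.intercalate]
  | cons a t ih =>
    cases t with
    | nil => simp [List.intercalate, List.intersperse]
    | cons b t' =>
      have h1 : List.intercalate [' '] ((a :: b :: t') ++ [y]) =
          a ++ [' '] ++ List.intercalate [' '] ((b :: t') ++ [y]) := by
        simp [List.intercalate, List.intersperse]
      have h2 : List.intercalate [' '] (a :: b :: t') =
          a ++ [' '] ++ List.intercalate [' '] (b :: t') := by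
        simp [List.intercalate, List.intersperse]
      rw [h1, ih, h2]
      simp

theorem pvInter_ne (ws : List (List Char)) (hws : ws ≠ []) (hne : ∀ w ∈ ws, w ≠ []) :
    List.intercalate [' '] ws ≠ [] := by
  obtain ⟨xs, y, rfl⟩ : ∃ xs y, ws = xs ++ [y] := by
    cases hx : ws.reverse with
    | nil => exact absurd (by simpa using congrArg List.reverse hx) hws
    | cons a t => exact ⟨t.reverse, a, by simpa using congrArg List.reverse hx⟩
  rw [pvInter_snoc]
  have : y ≠ [] := hne y (by simp)
  intro h
  rcases List.append_eq_nil_iff.mp h with ⟨_, h2⟩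
  exact this h2

theorem pvRender_nil_ne {acc : List (List Char)} (ha : acc ≠ [])
    (hacc : ∀ w ∈ acc, w ≠ []) : pvRender acc [] ≠ [] := by
  rw [pvRender_nil]
  exact pvInter_ne _ (by simpa using ha) (fun w hw => hacc w (by simpa using hw))

-- the fused pass computes the joined words
theorem pvMachine :
    ∀ (l cur : List Char) (acc : List (List Char)) (sep : Bool),
      (∀ w ∈ acc, w ≠ []) →
      (sep = true → cur = []) →
      (cur = [] → acc = [] ∨ sep = true) →
      (l.foldl pvStep (pvRender acc cur, sep)).1 = List.intercalate [' '] (pvWGo l cur acc) := by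
  intro l
  induction l with
  | nil =>
    intro cur acc sep _ _ _
    simp only [List.foldl_nil, pvWGo, pvRender]
    by_cases hc : cur.isEmpty
    · rw [if_pos hc, if_pos hc]
    · rw [if_neg hc, if_neg hc]; simp
  | cons c rest ih =>
    intro cur acc sep hacc hsep hcur
    rw [List.foldl_cons, pvWGo]
    by_cases h1 : c = '{' ∨ c = '}'
    · rw [if_pos h1, pvStep, if_pos h1]
      exact ih cur acc sep hacc hsep hcur
    · rw [if_neg h1]
      by_cases h2 : PySem.Chars.isspace c = true
      · rw [if_pos h2, pvStep, if_neg h1, if_pos h2]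
        by_cases hc : cur.isEmpty
        · rw [if_pos hc]
          have : cur = [] := by simpa using hc
          subst this
          exact ih [] acc true hacc (fun _ => rfl) (fun _ => Or.inr rfl)
        · rw [if_neg hc]
          have hcne : cur ≠ [] := by simpa [List.isEmpty_iff] using hc
          have hren : pvRender acc cur = pvRender (cur.reverse :: acc) [] := by
            rw [pvRender_ne _ hcne, pvRender_nil]
            simp
          rw [show ((pvRender acc cur, true) : List Char × Bool) =
              (pvRender (cur.reverse :: acc) [], true) from by rw [hren]]
          refine ih [] (cur.reverse :: acc) true ?_ (fun _ => rfl) (fun _ => Or.inr rfl)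
          intro w hw
          rcases List.mem_cons.mp hw with hw | hw
          · subst hw
            simpa using fun h => hcne (by simpa using congrArg List.reverse h)
          · exact hacc w hw
      · by_cases h3 : c = '='
        · subst h3
          rw [if_neg h2, if_pos rfl, pvStep, if_neg h1, if_neg (by simpa using h2), if_pos rfl]
          by_cases hc : cur.isEmpty
          · rw [if_pos hc]
            have hcur0 : cur = [] := by simpa using hc
            subst hcur0
            have hkey : (if (pvRender acc [], sep).1.isEmpty then (pvRender acc [], sep).1
                  else (pvRender acc [], sep).1 ++ [' ']) ++ ['='] = pvRender (['='] :: acc) [] := by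
              simp only []
              rw [pvRender_nil, pvRender_nil]
              rw [show (['='] :: acc).reverse = acc.reverse ++ [['=']] from by simp, pvInter_snoc]
              by_cases ha : acc = []
              · subst ha; simp [List.intercalate]
              · have hne : List.intercalate [' '] acc.reverse ≠ [] :=
                  pvInter_ne _ (by simpa using ha) (fun w hw => hacc w (by simpa using hw))
                rw [if_neg (by simpa [List.isEmpty_iff] using hne),
                    if_neg (by simpa [List.isEmpty_iff] using ha)]
            rw [hkey]
            refine ih [] (['='] :: acc) true ?_ (fun _ => rfl) (fun _ => Or.inr rfl)
            intro w hw
            rcases List.mem_cons.mp hw with hw | hw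
            · subst hw; simp
            · exact hacc w hw
          · rw [if_neg hc]
            have hcne : cur ≠ [] := by simpa [List.isEmpty_iff] using hc
            have hkey : (if (pvRender acc cur, sep).1.isEmpty then (pvRender acc cur, sep).1
                  else (pvRender acc cur, sep).1 ++ [' ']) ++ ['='] =
                pvRender (['='] :: cur.reverse :: acc) [] := by
              simp only []
              have hne : List.intercalate [' '] (acc.reverse ++ [cur.reverse]) ≠ [] := by
                refine pvInter_ne _ (by simp) ?_
                intro w hw
                rcases List.mem_append.mp hw with hw | hw
                · exact hacc w (by simpa using hw)
                · rw [List.mem_singleton.mp hw]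
                  simpa using fun h => hcne (by simpa using congrArg List.reverse h)
              have hr : List.intercalate [' '] ((acc.reverse ++ [cur.reverse]) ++ [['=']]) =
                  List.intercalate [' '] (acc.reverse ++ [cur.reverse]) ++ [' '] ++ ['='] := by
                rw [pvInter_snoc, if_neg (by simp)]
              rw [pvRender_ne _ hcne, pvRender_nil]
              rw [if_neg (by simpa [List.isEmpty_iff] using hne)]
              rw [show (['='] :: cur.reverse :: acc).reverse =
                  (acc.reverse ++ [cur.reverse]) ++ [['=']] from by simp, hr]
            rw [hkey]
            refine ih [] (['='] :: cur.reverse :: acc) true ?_ (fun _ => rfl) (fun _ => Or.inr rfl)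
            intro w hw
            rcases List.mem_cons.mp hw with hw | hw
            · subst hw; simp
            · rcases List.mem_cons.mp hw with hw | hw
              · subst hw
                simpa using fun h => hcne (by simpa using congrArg List.reverse h)
              · exact hacc w hw
        · -- ordinary character
          rw [if_neg h2, if_neg h3, pvStep, if_neg h1, if_neg (by simpa using h2), if_neg h3]
          have hkey : (if ((pvRender acc cur, sep).2 && !(pvRender acc cur, sep).1.isEmpty)
                then (pvRender acc cur, sep).1 ++ [' '] else (pvRender acc cur, sep).1) ++ [c] =
              pvRender acc (c :: cur) := by
            simp only []
            by_cases hc : cur.isEmpty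
            · have hcur0 : cur = [] := by simpa using hc
              subst hcur0
              by_cases ha : acc = []
              · subst ha
                have h0 : pvRender ([] : List (List Char)) [] = [] := by
                  simp [pvRender, List.intercalate]
                have hn : pvRender ([] : List (List Char)) [c] = [c] := by
                  rw [pvRender_ne _ (by simp)]
                  simp [List.intercalate]
                rw [h0, hn]
                simp
              · rcases hcur rfl with ha' | hs
                · exact absurd ha' ha
                · subst hs
                  have hne : pvRender acc [] ≠ [] := pvRender_nil_ne ha hacc
                  rw [if_pos (by simp [hne])]
                  rw [pvRender_nil, pvRender_ne _ (by simp : ([c] : List Char) ≠ [])]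
                  rw [show ([c] : List Char).reverse = [c] from by simp, pvInter_snoc]
                  rw [if_neg (by simpa [List.isEmpty_iff] using ha)]
            · have hcne : cur ≠ [] := by simpa [List.isEmpty_iff] using hc
              have hsf : sep = false := by
                cases sep
                · rfl
                · exact absurd (hsep rfl) hcne
              subst hsf
              rw [if_neg (by simp)]
              rw [pvRender_ne _ hcne, pvRender_ne _ (by simp : (c :: cur) ≠ [])]
              rw [pvInter_snoc, pvInter_snoc]
              rw [show (c :: cur).reverse = cur.reverse ++ [c] from by simp]
              simp
          rw [hkey]
          exact ih (c :: cur) acc false hacc (by simp)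
            (fun h => absurd h (List.cons_ne_nil c cur))

-- list-level assembly: B's fused pass = A's brace/equals replaces + split + join
theorem pvTail (t : List Char) :
    (t.foldl pvStep ([], false)).1 =
      List.intercalate [' ']
        (PySem.Chars.split₀
          (PySem.Chars.replace
            (PySem.Chars.replace (PySem.Chars.replace t ['{'] []) ['}'] []) ['='] [' ', '=', ' '])) := by
  rw [pvReplace_eq_scanTok _ _ _ (by decide), pvReplace_eq_scanTok _ _ _ (by decide),
      pvReplace_eq_scanTok _ _ _ (by decide), pvTailReps]
  rw [PySem.Chars.split₀, pvSplit_words]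
  have h0 : pvRender [] [] = [] := by simp [pvRender, List.intercalate]
  have := pvMachine t [] [] false (by simp) (by simp) (fun _ => Or.inl rfl)
  rw [h0] at this
  exact this

-- string-level form of pvTail
theorem pvStrTail (s : String) :
    PySem.Str.join " " (PySem.Str.split₀ (PySem.Str.replace
      (PySem.Str.replace (PySem.Str.replace s "{" "") "}" "") "=" " = ")) =
    String.ofList ((s.toList.foldl pvStep ([], false)).1) := by
  rw [PySem.Str.join, PySem.Str.split₀, List.map_map]
  rw [show (String.toList ∘ String.ofList) = id from by funext l; simp, List.map_id]
  rw [show PySem.Chars.join " ".toList = List.intercalate [' '] from by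
    funext parts; rw [PySem.Chars.join]; rfl]
  simp only [PySem.Str.toList_replace]
  rw [show ("{".toList : List Char) = ['{'] from rfl, show ("}".toList : List Char) = ['}'] from rfl,
      show ("=".toList : List Char) = ['='] from rfl,
      show (" = ".toList : List Char) = [' ', '=', ' '] from rfl,
      show ("".toList : List Char) = ([] : List Char) from rfl]
  rw [← pvTail]

-- string-level form of the nine token passes
theorem pvStrNine (s : String) :
    (PySem.Str.replace (PySem.Str.replace (PySem.Str.replace (PySem.Str.replace
      (PySem.Str.replace (PySem.Str.replace (PySem.Str.replace (PySem.Str.replace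
      (PySem.Str.replace s
        "\\delta" "δ") "\\nu" "ν") "\\sqrt" "√") "\\frac" "") "\\left" "")
        "\\right" "") "\\," " ") "^2" "²") "^3" "³").toList =
    pvToksB.foldl (fun s p => pvScanTok p.1 p.2 s) s.toList := by
  simp only [PySem.Str.toList_replace]
  rw [show ("".toList : List Char) = ([] : List Char) from rfl]
  rw [pvReplace_eq_scanTok _ _ _ (by decide), pvReplace_eq_scanTok _ _ _ (by decide),
      pvReplace_eq_scanTok _ _ _ (by decide), pvReplace_eq_scanTok _ _ _ (by decide),
      pvReplace_eq_scanTok _ _ _ (by decide), pvReplace_eq_scanTok _ _ _ (by decide),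
      pvReplace_eq_scanTok _ _ _ (by decide), pvReplace_eq_scanTok _ _ _ (by decide),
      pvReplace_eq_scanTok _ _ _ (by decide)]
  rfl

-- ===== VERDICT (by name: the statement is the Claim_ definition above) =====
set_option maxRecDepth 8192 in
theorem format_equation_text_py_spec : Claim_equal_format_equation_text_py := by
  intro equation _
  unfold Spec_format_equation_text_py
  simp only [format_equation_text_py, format_equation_text_py_alt]
  by_cases h : PySem.Str.len (PySem.Str.strip equation) = 0
  · rw [if_pos h, if_pos h]
  · rw [if_neg h, if_neg h, ← pvStrNine, pvStrTail]
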